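-- pv_equiv track=rewrite | github.com/37chengshan/scholar-ai | apps/api/app/core/contextual_chunk_builder.py | _window_text
-- ===== SOURCE A (Python) =====
-- from typing import Any, Dict, List, Optional
--
-- def _window_text(
--     items: List[Dict[str, Any]],
--     current_idx: int,
--     window: int = 1,
-- ) -> str:
--     """Return concatenated text of neighbours within the given window radius."""
--     parts: List[str] = []
--     for offset in range(-window, window + 1):
--         if offset == 0:
--             continue
--         neighbour_idx = current_idx + offset
--         if 0 <= neighbour_idx < len(items):
--             neighbour = items[neighbour_idx]
--             t = neighbour.get("text", "") or neighbour.get("content_data", "") or ""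
--             if t.strip():
--                 parts.append(t.strip()[:300])
--     return " … ".join(parts)
-- ===== SOURCE B (Python) =====
-- def _window_text(items, current_idx, window=1):
--     """Single pass over the enumerated list with an index-distance predicate,
--     then a second staged pass truncating and joining the non-empty strips."""
--     pieces = [
--         (n.get("text", "") or n.get("content_data", "") or "").strip()
--         for i, n in enumerate(items)
--         if i != current_idx and abs(i - current_idx) <= window
--     ]
--     return " … ".join(s[:300] for s in pieces if s)
-- ===== Notes on version B (the rewrite author's own statement) =====
-- stated objective: alternative
-- what changed: B scans the whole enumerated list once, selecting neighbours by an index-distance predicate (i != current_idx and abs(i-current_idx) <= window) and staging extraction into a strip pass followed by a filter/truncate/join pass, instead of A's loop over signed offsets with per-offset bounds checks and random-access indexing.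
import Mathlib
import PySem

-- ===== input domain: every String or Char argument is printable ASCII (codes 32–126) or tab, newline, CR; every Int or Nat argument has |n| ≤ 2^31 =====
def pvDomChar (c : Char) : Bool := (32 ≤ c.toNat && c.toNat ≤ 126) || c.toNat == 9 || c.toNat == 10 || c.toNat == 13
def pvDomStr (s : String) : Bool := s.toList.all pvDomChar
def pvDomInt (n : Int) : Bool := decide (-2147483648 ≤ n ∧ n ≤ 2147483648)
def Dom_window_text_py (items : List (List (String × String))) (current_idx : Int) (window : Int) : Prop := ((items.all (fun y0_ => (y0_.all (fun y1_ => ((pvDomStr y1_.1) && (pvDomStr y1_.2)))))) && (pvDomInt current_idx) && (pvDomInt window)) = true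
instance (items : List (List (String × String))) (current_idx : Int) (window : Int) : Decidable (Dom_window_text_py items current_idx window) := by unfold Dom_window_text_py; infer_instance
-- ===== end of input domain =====

-- B scans the enumerated list once with an index-distance predicate and stages the
-- extraction (strip pass, then filter/truncate/join), instead of A's offset loop with
-- bounds checks and random-access indexing (objective: alternative decomposition).

-- ===== PORT A =====
def window_text_py (items : List (List (String × String))) (current_idx : Int) (window : Int) : String :=
  let parts : List String :=
    (PySem.List.pyRange (-window) (window + 1) 1).foldl (fun parts offset =>
      if offset = 0 then parts
      else
        let neighbour_idx := current_idx + offset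
        if 0 ≤ neighbour_idx ∧ neighbour_idx < (items.length : Int) then
          let neighbour := PySem.Dict.mk (PySem.List.pyGetD items neighbour_idx [])
          let t0 := neighbour.getD "text" ""
          let t1 := if t0 ≠ "" then t0 else neighbour.getD "content_data" ""
          let t := if t1 ≠ "" then t1 else ""
          if PySem.Str.strip t ≠ "" then
            parts ++ [PySem.Str.slice (PySem.Str.strip t) none (some 300)]
          else parts
        else parts) []
  PySem.Str.join " … " parts

-- ===== PORT B =====
def window_text_py_alt (items : List (List (String × String))) (current_idx : Int) (window : Int) : String :=
  let pieces : List String :=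
    (PySem.List.enumerate items 0).filterMap (fun p =>
      if p.1 ≠ current_idx ∧ |p.1 - current_idx| ≤ window then
        let d := PySem.Dict.mk p.2
        let t0 := d.getD "text" ""
        let t1 := if t0 ≠ "" then t0 else d.getD "content_data" ""
        some (PySem.Str.strip (if t1 ≠ "" then t1 else ""))
      else none)
  PySem.Str.join " … " ((pieces.filter (fun s => s ≠ "")).map (fun s => PySem.Str.slice s none (some 300)))

-- ===== PRECONDITION & SPEC =====
def Spec_window_text_py (items : List (List (String × String))) (current_idx : Int) (window : Int) (out : String) : Prop := out = window_text_py_alt items current_idx window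
instance (items : List (List (String × String))) (current_idx : Int) (window : Int) (out : String) : Decidable (Spec_window_text_py items current_idx window out) := by unfold Spec_window_text_py; infer_instance

-- ===== CLAIM (what is proved, stated in full; the proofs are below) =====
def Claim_equal_window_text_py : Prop := ∀ (items : List (List (String × String))) (current_idx : Int) (window : Int), Dom_window_text_py items current_idx window → Spec_window_text_py items current_idx window (window_text_py items current_idx window)

-- ===== LEMMAS AND PROOFS =====

/-- The stripped candidate string both programs compute from a neighbour. -/
def pvStrip (n : List (String × String)) : String :=
  let d := PySem.Dict.mk n
  let t0 := d.getD "text" ""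
  let t1 := if t0 ≠ "" then t0 else d.getD "content_data" ""
  PySem.Str.strip (if t1 ≠ "" then t1 else "")

/-- The parts a neighbour contributes. -/
def pvExt (n : List (String × String)) : List String :=
  if pvStrip n ≠ "" then [PySem.Str.slice (pvStrip n) none (some 300)] else []

/-- Extraction at an index, guarded by A's bounds test. -/
def pvF (items : List (List (String × String))) (i : Int) : List String :=
  if 0 ≤ i ∧ i < (items.length : Int) then pvExt (PySem.List.pyGetD items i []) else []

lemma pvA_parts (items : List (List (String × String))) (ci w : Int) :
    window_text_py items ci w =
      PySem.Str.join " … " ((PySem.List.pyRange (-w) (w + 1) 1).flatMap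
        (fun off => if ci + off = ci then [] else pvF items (ci + off))) := by
  unfold window_text_py
  have hbody : (PySem.List.pyRange (-w) (w + 1) 1).foldl (fun parts offset =>
      if offset = 0 then parts
      else
        let neighbour_idx := ci + offset
        if 0 ≤ neighbour_idx ∧ neighbour_idx < (items.length : Int) then
          let neighbour := PySem.Dict.mk (PySem.List.pyGetD items neighbour_idx [])
          let t0 := neighbour.getD "text" ""
          let t1 := if t0 ≠ "" then t0 else neighbour.getD "content_data" ""
          let t := if t1 ≠ "" then t1 else ""
          if PySem.Str.strip t ≠ "" then
            parts ++ [PySem.Str.slice (PySem.Str.strip t) none (some 300)]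
          else parts
        else parts) [] =
    (PySem.List.pyRange (-w) (w + 1) 1).foldl
      (fun acc off => acc ++ (if ci + off = ci then [] else pvF items (ci + off))) [] := by
    apply PySem.List.foldl_congr_mem
    intro acc off _
    by_cases h0 : off = 0
    · simp [h0]
    · simp only [if_neg h0, if_neg (show ¬ ci + off = ci by omega)]
      unfold pvF pvExt pvStrip
      dsimp only
      split_ifs <;> simp_all
  rw [hbody, PySem.List.foldl_append_eq_flatMap, List.nil_append]

/-- B's comprehension chain collapses to a flatMap of `pvExt` over the selected pairs. -/
lemma pvB_port_eq (items : List (List (String × String))) (ci w : Int) :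
    window_text_py_alt items ci w =
      PySem.Str.join " … " ((((PySem.List.enumerate items 0).filterMap (fun p =>
          if p.1 ≠ ci ∧ |p.1 - ci| ≤ w then some (pvStrip p.2) else none)).filter
        (fun s => s ≠ "")).map (fun s => PySem.Str.slice s none (some 300))) := rfl

lemma pvB_chain (ci w : Int) (l : List (Int × List (String × String))) :
    ((l.filterMap (fun p =>
        if p.1 ≠ ci ∧ |p.1 - ci| ≤ w then some (pvStrip p.2) else none)).filter
      (fun s => s ≠ "")).map (fun s => PySem.Str.slice s none (some 300)) =
      l.flatMap (fun p => if p.1 ≠ ci ∧ |p.1 - ci| ≤ w then pvExt p.2 else []) := by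
  induction l with
  | nil => rfl
  | cons p l ih =>
    rw [List.filterMap_cons, List.flatMap_cons]
    by_cases h : p.1 ≠ ci ∧ |p.1 - ci| ≤ w
    · rw [if_pos h, if_pos h, List.filter_cons]
      by_cases hs : pvStrip p.2 = ""
      · rw [if_neg (by simp [hs]), ih]
        unfold pvExt
        rw [if_neg (by simp [hs]), List.nil_append]
      · rw [if_pos (by simp [hs]), List.map_cons, ih]
        unfold pvExt
        rw [if_pos hs, List.singleton_append]
    · rw [if_neg h, if_neg h, List.nil_append]
      exact ih

lemma pvShift (F : Int → List String) (ci a b : Int) :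
    (PySem.List.pyRange a b 1).flatMap (fun off => F (ci + off)) =
      (PySem.List.pyRange (ci + a) (ci + b) 1).flatMap F := by
  rw [PySem.List.pyRange_one a b, PySem.List.pyRange_one (ci + a) (ci + b)]
  have h : (b - a).toNat = (ci + b - (ci + a)).toNat := by omega
  rw [← h, List.flatMap_map, List.flatMap_map]
  apply List.flatMap_congr
  intro k _
  have : ci + (a + k) = ci + a + k := by ring
  rw [this]

/-- Restricting a guarded flatMap over an index range to the support interval. -/
lemma pvRangeRestrict (H : Int → List String) (a b c d : Int) (hac : a ≤ c) (hdb : d ≤ b)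
    (hv : ∀ i, a ≤ i → i < b → (i < c ∨ d ≤ i) → H i = []) :
    (PySem.List.pyRange a b 1).flatMap H = (PySem.List.pyRange c d 1).flatMap H := by
  by_cases hcd : c ≤ d
  · rw [PySem.List.pyRange_one_append a c b hac (le_trans hcd hdb),
        PySem.List.pyRange_one_append c d b hcd hdb,
        List.flatMap_append, List.flatMap_append]
    have h1 : (PySem.List.pyRange a c 1).flatMap H = [] := by
      apply List.flatMap_eq_nil_iff.mpr
      intro i hi
      rw [PySem.List.mem_pyRange_one] at hi
      exact hv i hi.1 (by omega) (Or.inl hi.2)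
    have h2 : (PySem.List.pyRange d b 1).flatMap H = [] := by
      apply List.flatMap_eq_nil_iff.mpr
      intro i hi
      rw [PySem.List.mem_pyRange_one] at hi
      exact hv i (by omega) hi.2 (Or.inr hi.1)
    rw [h1, h2, List.nil_append, List.append_nil]
  · rw [PySem.List.pyRange_one_eq_nil (by omega : d ≤ c)]
    apply List.flatMap_eq_nil_iff.mpr
    intro i hi
    rw [PySem.List.mem_pyRange_one] at hi
    exact hv i hi.1 hi.2 (by omega)

-- ===== VERDICT (by name: the statement is the Claim_ definition above) =====
theorem window_text_py_spec : Claim_equal_window_text_py := by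
  intro items ci w _dom
  unfold Spec_window_text_py
  rw [pvA_parts]
  rw [pvB_port_eq, pvB_chain]
  congr 1
  -- B's selected-pairs flatMap as a guarded flatMap over the index range [0, len)
  rw [PySem.List.enumerate_eq_map_pyRange items ([] : List (String × String)), List.flatMap_map]
  simp only [PySem.List.len_eq]
  have hB : (PySem.List.pyRange 0 (items.length : Int) 1).flatMap
      (fun i => if i ≠ ci ∧ |i - ci| ≤ w then pvExt (PySem.List.pyGetD items i []) else []) =
      (PySem.List.pyRange 0 (items.length : Int) 1).flatMap
      (fun i => if i ≠ ci ∧ ci - w ≤ i ∧ i ≤ ci + w then pvF items i else []) := by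
    apply List.flatMap_congr
    intro i hi
    rw [PySem.List.mem_pyRange_one] at hi
    by_cases h : i ≠ ci ∧ |i - ci| ≤ w
    · have habs := abs_le.mp h.2
      rw [if_pos h, if_pos ⟨h.1, by omega, by omega⟩]
      unfold pvF
      rw [if_pos ⟨hi.1, hi.2⟩]
    · rw [if_neg h, if_neg (by rw [abs_le] at h; omega)]
  rw [hB]
  rcases lt_or_ge w 0 with hneg | hpos
  · -- window < 0: A's offset range is empty and B selects nothing
    rw [PySem.List.pyRange_one_eq_nil (by omega : w + 1 ≤ -w), List.flatMap_nil]
    symm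
    apply List.flatMap_eq_nil_iff.mpr
    intro i hi
    rw [if_neg (by omega)]
  · -- window ≥ 0: both sides restrict to the interval [max 0 (ci-w), min len (ci+w+1))
    set H : Int → List String :=
      fun i => if i ≠ ci ∧ ci - w ≤ i ∧ i ≤ ci + w then pvF items i else [] with hH
    have hA : (PySem.List.pyRange (-w) (w + 1) 1).flatMap
        (fun off => if ci + off = ci then [] else pvF items (ci + off)) =
        (PySem.List.pyRange (ci + -w) (ci + (w + 1)) 1).flatMap
        (fun i => if i = ci then [] else pvF items i) :=
      pvShift (fun i => if i = ci then [] else pvF items i) ci (-w) (w + 1)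
    rw [hA]
    have hA2 : (PySem.List.pyRange (ci + -w) (ci + (w + 1)) 1).flatMap
        (fun i => if i = ci then [] else pvF items i) =
        (PySem.List.pyRange (ci + -w) (ci + (w + 1)) 1).flatMap H := by
      apply List.flatMap_congr
      intro i hi
      rw [PySem.List.mem_pyRange_one] at hi
      by_cases hici : i = ci
      · rw [if_pos hici, hH]
        dsimp only
        rw [if_neg (by simp [hici])]
      · rw [if_neg hici, hH]
        dsimp only
        rw [if_pos (show i ≠ ci ∧ ci - w ≤ i ∧ i ≤ ci + w from ⟨hici, by omega, by omega⟩)]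
    rw [hA2]
    have hvan : ∀ i, (i < max 0 (ci - w) ∨ min (items.length : Int) (ci + w + 1) ≤ i) → H i = [] := by
      intro i hcase
      rw [hH]
      dsimp only
      rcases hcase with hlt | hge
      · by_cases hi0 : 0 ≤ i
        · exact if_neg (by omega)
        · by_cases hc : i ≠ ci ∧ ci - w ≤ i ∧ i ≤ ci + w
          · rw [if_pos hc]; unfold pvF; rw [if_neg (by omega)]
          · exact if_neg hc
      · by_cases hil : i < (items.length : Int)
        · exact if_neg (by omega)
        · by_cases hc : i ≠ ci ∧ ci - w ≤ i ∧ i ≤ ci + w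
          · rw [if_pos hc]; unfold pvF; rw [if_neg (by omega)]
          · exact if_neg hc
    rw [pvRangeRestrict H (ci + -w) (ci + (w + 1)) (max 0 (ci - w))
        (min (items.length : Int) (ci + w + 1)) (by omega) (by omega)
        (fun i _ _ hc => hvan i hc),
      pvRangeRestrict H 0 (items.length : Int) (max 0 (ci - w))
        (min (items.length : Int) (ci + w + 1)) (by omega) (by omega)
        (fun i _ _ hc => hvan i hc)]
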